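-- pv_equiv track=rewrite | github.com/jasonyandell/advent-of-code-2025 | day_01.py | part1
-- ===== SOURCE A (Python) =====
-- def part1(commands:list[tuple[str, int]]):
--     pos = 50
--     zeroes = 0
--     for (direction, value) in commands:
--         if (direction == "L"): pos = pos - value
--         else: pos = pos + value
--         pos = (pos + 1000000000) % 100
--         if pos == 0: zeroes += 1
--
--     return zeroes
-- ===== SOURCE B (Python) =====
-- def part1(commands):
--     # pass 1: total signed displacement over all commands
--     total = sum(-v if d == "L" else v for (d, v) in commands)
--     # pass 2: walk the commands BACKWARDS, maintaining the suffix sum of deltas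
--     # that come after the current command; the position right after a command
--     # is 50 + total - (that suffix sum), and we count the ones on a multiple of 100
--     zeroes = 0
--     tail = 0
--     for (d, v) in reversed(commands):
--         if (50 + total - tail) % 100 == 0:
--             zeroes += 1
--         tail += -v if d == "L" else v
--     return zeroes
-- ===== Notes on version B (the rewrite author's own statement) =====
-- stated objective: alternative
-- what changed: Replaces A's forward simulation (position re-normalized mod 100 with a +1000000000 shift every step) by a reverse traversal: compute the total displacement once, then walk the commands back-to-front keeping only the suffix sum of deltas, reconstructing each visited position as 50 + total - suffix and counting multiples of 100; correct because the count is order-independent.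
import Mathlib
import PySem

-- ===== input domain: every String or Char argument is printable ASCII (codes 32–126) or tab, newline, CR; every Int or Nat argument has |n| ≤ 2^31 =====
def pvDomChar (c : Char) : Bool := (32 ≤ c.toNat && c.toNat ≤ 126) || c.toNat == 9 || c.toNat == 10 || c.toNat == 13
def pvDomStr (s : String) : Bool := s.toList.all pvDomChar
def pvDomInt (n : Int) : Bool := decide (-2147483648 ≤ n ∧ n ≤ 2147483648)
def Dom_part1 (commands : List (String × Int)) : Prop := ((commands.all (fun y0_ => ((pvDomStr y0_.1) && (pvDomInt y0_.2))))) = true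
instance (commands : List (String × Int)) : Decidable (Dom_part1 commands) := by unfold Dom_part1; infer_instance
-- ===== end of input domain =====

-- B replaces A's forward mod-100 simulation by a reverse traversal: total displacement
-- computed once, then a backwards walk over suffix sums. Objective: alternative decomposition.

-- ===== PORT A =====
def part1 (commands : List (String × Int)) : Int :=
  (commands.foldl
    (fun (st : Int × Int) cmd =>
      let pos := if cmd.1 == "L" then st.1 - cmd.2 else st.1 + cmd.2
      let pos := PySem.Int.mod (pos + 1000000000) 100
      (pos, if pos == 0 then st.2 + 1 else st.2))
    (50, 0)).2

-- ===== PORT B =====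
def part1_alt (commands : List (String × Int)) : Int :=
  let total := (commands.map (fun c => if c.1 == "L" then -c.2 else c.2)).sum
  (commands.reverse.foldl
    (fun (st : Int × Int) c =>
      let zeroes := if PySem.Int.mod (50 + total - st.1) 100 == 0 then st.2 + 1 else st.2
      (st.1 + (if c.1 == "L" then -c.2 else c.2), zeroes))
    (0, 0)).2

-- ===== PRECONDITION & SPEC =====
def Spec_part1 (commands : List (String × Int)) (out : Int) : Prop := out = part1_alt commands
instance (commands : List (String × Int)) (out : Int) : Decidable (Spec_part1 commands out) := by unfold Spec_part1; infer_instance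

-- ===== CLAIM (what is proved, stated in full; the proofs are below) =====
def Claim_equal_part1 : Prop := ∀ (commands : List (String × Int)), Dom_part1 commands → Spec_part1 commands (part1 commands)

-- ===== LEMMAS AND PROOFS =====

-- positions visited forwards: prefix sums of the deltas starting from p
def pvPrefixes (p : Int) : List Int → List Int
  | [] => []
  | d :: ds => (p + d) :: pvPrefixes (p + d) ds

-- positions checked by B's backwards walk: s, s - d0, s - d0 - d1, …
def pvChecks (s : Int) : List Int → List Int
  | [] => []
  | d :: ds => s :: pvChecks (s - d) ds

lemma pvMod100 (p t : Int) :
    PySem.Int.mod (PySem.Int.mod p 100 + t + 1000000000) 100 = PySem.Int.mod (p + t) 100 := by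
  simp only [PySem.Int.mod_eq_emod_of_pos (show (0:Int) < 100 by norm_num)]
  omega

-- A's fused loop counts the prefix-sum positions divisible by 100
lemma pvLoopA_eq (cs : List (String × Int)) : ∀ (z p : Int),
    (cs.foldl
      (fun (st : Int × Int) cmd =>
        let pos := if cmd.1 == "L" then st.1 - cmd.2 else st.1 + cmd.2
        let pos := PySem.Int.mod (pos + 1000000000) 100
        (pos, if pos == 0 then st.2 + 1 else st.2))
      (PySem.Int.mod p 100, z)).2
    = z + (((pvPrefixes p (cs.map (fun c => if c.1 == "L" then -c.2 else c.2))).countP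
              (fun q => PySem.Int.mod q 100 == 0) : Nat) : Int) := by
  induction cs with
  | nil => intro z p; simp [pvPrefixes]
  | cons c cs ih =>
    intro z p
    have hpos : (if c.1 == "L" then PySem.Int.mod p 100 - c.2 else PySem.Int.mod p 100 + c.2)
        = PySem.Int.mod p 100 + (if c.1 == "L" then -c.2 else c.2) := by
      by_cases h : c.1 == "L" <;> simp [h] <;> ring
    simp only [List.foldl_cons, List.map_cons, pvPrefixes, hpos, pvMod100]
    rw [ih]
    simp only [List.countP_cons]
    split_ifs <;> (push_cast; ring)

-- B's backwards loop counts the pvChecks positions divisible by 100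
lemma pvLoopB_eq (total : Int) (cs : List (String × Int)) : ∀ (t z : Int),
    (cs.foldl
      (fun (st : Int × Int) c =>
        let zeroes := if PySem.Int.mod (50 + total - st.1) 100 == 0 then st.2 + 1 else st.2
        (st.1 + (if c.1 == "L" then -c.2 else c.2), zeroes))
      (t, z)).2
    = z + (((pvChecks (50 + total - t) (cs.map (fun c => if c.1 == "L" then -c.2 else c.2))).countP
              (fun q => PySem.Int.mod q 100 == 0) : Nat) : Int) := by
  induction cs with
  | nil => intro t z; simp [pvChecks]
  | cons c cs ih =>
    intro t z
    simp only [List.foldl_cons, List.map_cons, pvChecks]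
    rw [ih]
    have : 50 + total - (t + (if c.1 == "L" then -c.2 else c.2))
        = 50 + total - t - (if c.1 == "L" then -c.2 else c.2) := by ring
    rw [this]
    simp only [List.countP_cons]
    split_ifs <;> (push_cast; ring)

lemma pvChecks_snoc (d : Int) : ∀ (xs : List Int) (s : Int),
    pvChecks s (xs ++ [d]) = pvChecks s xs ++ [s - xs.sum] := by
  intro xs
  induction xs with
  | nil => intro s; simp [pvChecks]
  | cons x xs ih =>
    intro s
    simp only [List.cons_append, pvChecks, ih, List.sum_cons]
    congr 2
    ring

lemma pvChecks_reverse (ds : List Int) : ∀ (p : Int),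
    pvChecks (p + ds.sum) ds.reverse = (pvPrefixes p ds).reverse := by
  induction ds with
  | nil => intro p; simp [pvChecks, pvPrefixes]
  | cons d ds ih =>
    intro p
    simp only [List.reverse_cons, List.sum_cons, pvPrefixes]
    rw [pvChecks_snoc]
    have h1 : p + (d + ds.sum) = (p + d) + ds.sum := by ring
    rw [h1, ih (p + d)]
    simp [List.sum_reverse]

-- ===== VERDICT (by name: the statement is the Claim_ definition above) =====
theorem part1_spec : Claim_equal_part1 := by
  intro commands _
  show part1 commands = part1_alt commands
  have hA := pvLoopA_eq commands 0 50
  rw [show PySem.Int.mod (50:Int) 100 = 50 from by decide] at hA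
  have hB := pvLoopB_eq ((commands.map (fun c => if c.1 == "L" then -c.2 else c.2)).sum) commands.reverse 0 0
  simp only [part1, part1_alt, hA, hB, zero_add, sub_zero]
  rw [List.map_reverse,
    pvChecks_reverse (commands.map (fun c => if c.1 == "L" then -c.2 else c.2)) 50,
    List.countP_reverse]
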